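-- pv_equiv track=rewrite | github.com/JLLGit/alg_notes | alg_notes.py | tank
-- ===== SOURCE A (Python) =====
-- def tank(l):
--     vmax = 0
--     for i in range(len(l)):
--         for j in range(len(l)):
--             h1 = l[i]
--             h2 = l[j]
--             if h1 >= h2:
--                 v = abs(i - j) * h1
--             if v > vmax:
--                 vmax = v
--     return vmax
-- ===== SOURCE B (Python) =====
-- def tank(l):
--     n = len(l)
--     order = sorted(range(n), key=lambda k: l[k])
--     best = 0
--     lo = n
--     hi = -1
--     i = 0
--     while i < n:
--         v = l[order[i]]
--         j = i
--         while j < n and l[order[j]] == v: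
--             j += 1
--         grp = order[i:j]
--         for k in grp:
--             if k < lo:
--                 lo = k
--             if k > hi:
--                 hi = k
--         for k in grp:
--             c = v * max(k - lo, hi - k)
--             if c > best:
--                 best = c
--         i = j
--     return best
-- ===== Notes on version B (the rewrite author's own statement) =====
-- stated objective: faster
-- what changed: Replaces A's all-pairs scan by sorting the indices by value and sweeping the equal-value groups in nondecreasing order while maintaining the min/max index seen so far, so each element's farthest eligible endpoint is read off directly.
import Mathlib
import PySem

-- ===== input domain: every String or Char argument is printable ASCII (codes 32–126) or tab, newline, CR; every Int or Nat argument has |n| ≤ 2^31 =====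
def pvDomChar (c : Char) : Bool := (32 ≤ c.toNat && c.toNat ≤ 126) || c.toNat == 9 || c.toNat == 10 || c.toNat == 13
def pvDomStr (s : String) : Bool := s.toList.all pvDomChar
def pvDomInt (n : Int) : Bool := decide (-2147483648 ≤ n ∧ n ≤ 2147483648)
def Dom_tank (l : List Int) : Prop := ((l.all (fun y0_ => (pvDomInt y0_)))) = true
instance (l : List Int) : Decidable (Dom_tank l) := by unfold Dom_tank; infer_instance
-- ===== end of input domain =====

-- B replaces A's all-pairs scan by sorting the indices by value and sweeping the equal-value
-- groups in nondecreasing order while maintaining the min/max index seen so far (faster).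

-- ===== PORT A =====
-- inner loop body of A (the stale `v` is carried in the state; it is never read before first assignment)
def tankStep (l : List Int) (i : Int) (st : Int × Int) (j : Int) : Int × Int :=
  let h1 := PySem.List.pyGetD l i 0
  let h2 := PySem.List.pyGetD l j 0
  let v := if h1 ≥ h2 then |i - j| * h1 else st.2
  (if v > st.1 then v else st.1, v)

def tank (l : List Int) : Int :=
  ((PySem.List.pyRange 0 (l.length : Int) 1).foldl (fun st i =>
    (PySem.List.pyRange 0 (l.length : Int) 1).foldl (tankStep l i) st) ((0 : Int), (0 : Int))).1

-- ===== PORT B =====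
-- the grouped sweep: `rest` is the unprocessed suffix of the sorted index list; one step
-- consumes the maximal run of equal values (Python's inner `while l[order[j]] == v`),
-- updates lo/hi with the whole group, then scores each member of the group
def tankAltLoop (l : List Int) (rest : List Int) (lo hi best : Int) : Int :=
  match rest with
  | [] => best
  | k0 :: r =>
    let v := PySem.List.pyGetD l k0 0
    let grp := k0 :: r.takeWhile (fun k => PySem.List.pyGetD l k 0 == v)
    let lo' := grp.foldl (fun a k => if k < a then k else a) lo
    let hi' := grp.foldl (fun a k => if k > a then k else a) hi
    let best' := grp.foldl (fun b k =>
      if v * max (k - lo') (hi' - k) > b then v * max (k - lo') (hi' - k) else b) best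
    tankAltLoop l (r.dropWhile (fun k => PySem.List.pyGetD l k 0 == v)) lo' hi' best'
termination_by rest.length
decreasing_by
  simp only [List.length_cons]
  exact Nat.lt_succ_of_le (List.length_dropWhile_le _ _)

def tank_alt (l : List Int) : Int :=
  tankAltLoop l
    (PySem.List.sorted (PySem.List.pyRange 0 (l.length : Int) 1)
      (fun k => PySem.List.pyGetD l k 0))
    (l.length : Int) (-1) 0

-- ===== PRECONDITION & SPEC =====
def Spec_tank (l : List Int) (out : Int) : Prop := out = tank_alt l
instance (l : List Int) (out : Int) : Decidable (Spec_tank l out) := by unfold Spec_tank; infer_instance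

-- ===== CLAIM (what is proved, stated in full; the proofs are below) =====
def Claim_equal_tank : Prop := ∀ (l : List Int), Dom_tank l → Spec_tank l (tank l)

-- ===== LEMMAS AND PROOFS =====

-- the common yardstick: for index i, E l i is the list of eligible indices (value ≤ l[i]),
-- mlo/mhi its extreme members, Fc the candidate A and B both maximise
def Eset (l : List Int) (i : Int) : List Int :=
  (PySem.List.pyRange 0 (l.length : Int) 1).filter
    (fun j => decide (PySem.List.pyGetD l j 0 ≤ PySem.List.pyGetD l i 0))

def mlo (l : List Int) (i : Int) : Int :=
  (Eset l i).foldl (fun a k => if k < a then k else a) i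

def mhi (l : List Int) (i : Int) : Int :=
  (Eset l i).foldl (fun a k => if k > a then k else a) i

def Fc (l : List Int) (i : Int) : Int :=
  PySem.List.pyGetD l i 0 * max (i - mlo l i) (mhi l i - i)

-- scalar form of A's inner loop (proof-only helper)
def scalarA (l : List Int) (i : Int) (acc j : Int) : Int :=
  if PySem.List.pyGetD l i 0 ≥ PySem.List.pyGetD l j 0
  then max acc (|i - j| * PySem.List.pyGetD l i 0) else acc

theorem mulmax {h : Int} (hh : 0 ≤ h) (a b : Int) : h * max a b = max (h*a) (h*b) := by
  rcases max_cases a b with ⟨e,_⟩|⟨e,_⟩ <;> rw [e] <;>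
    rcases max_cases (h*a) (h*b) with ⟨e2,_⟩|⟨e2,_⟩ <;> rw [e2] <;> nlinarith

theorem maxmul {h : Int} (hh : 0 ≤ h) (a b : Int) : max a b * h = max (a*h) (b*h) := by
  rw [mul_comm, mulmax hh, mul_comm a h, mul_comm b h]

theorem step_eq (h i j lo hi X : Int) (hh : 0 ≤ h) :
    max (max X (h * max (i - lo) (hi - i))) (|i - j| * h)
      = max X (h * max (i - (if j < lo then j else lo)) ((if j > hi then j else hi) - i)) := by
  have e1 : i - (if j < lo then j else lo) = max (i - lo) (i - j) := by split_ifs <;> omega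
  have e2 : (if j > hi then j else hi) - i = max (hi - i) (j - i) := by split_ifs <;> omega
  have e3 : |i - j| = max (i - j) (j - i) := by
    rcases abs_cases (i - j) with ⟨e,_⟩|⟨e,_⟩ <;> omega
  rw [e1, e2, e3]
  simp only [mulmax hh, maxmul hh]
  rw [mul_comm (i - j) h, mul_comm (j - i) h]
  generalize h * (i - lo) = a
  generalize h * (hi - i) = b
  generalize h * (i - j) = c
  generalize h * (j - i) = d
  omega

-- a fold with an if-guard is a fold over the filtered list
theorem foldl_ite_filter {σ : Type} (P : Int → Prop) [DecidablePred P] (f : σ → Int → σ) :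
    ∀ (js : List Int) (acc : σ),
      js.foldl (fun a j => if P j then f a j else a) acc
        = (js.filter (fun j => decide (P j))).foldl f acc := by
  intro js
  induction js with
  | nil => intro acc; rfl
  | cons j js ih =>
    intro acc
    by_cases hc : P j <;> simp [hc, ih]

theorem foldl_min_le (js : List Int) :
    ∀ lo : Int, js.foldl (fun a j => if j < a then j else a) lo ≤ lo := by
  induction js with
  | nil => intro lo; exact le_rfl
  | cons j js ih =>
    intro lo
    simp only [List.foldl_cons]
    refine (ih _).trans ?_
    split_ifs <;> omega

theorem le_foldl_max' (js : List Int) :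
    ∀ hi : Int, hi ≤ js.foldl (fun a j => if j > a then j else a) hi := by
  induction js with
  | nil => intro hi; exact le_rfl
  | cons j js ih =>
    intro hi
    simp only [List.foldl_cons]
    refine le_trans ?_ (ih _)
    split_ifs <;> omega

theorem core_nonneg {hv : Int} (hh : 0 ≤ hv) (i : Int) :
    ∀ (E : List Int) (lo hi acc : Int),
      E.foldl (fun acc j => max acc (|i - j| * hv)) (max acc (hv * max (i - lo) (hi - i)))
        = max acc (hv * max (i - E.foldl (fun a j => if j < a then j else a) lo)
                          ((E.foldl (fun a j => if j > a then j else a) hi) - i)) := by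
  intro E
  induction E with
  | nil => intro lo hi acc; rfl
  | cons j E ih =>
    intro lo hi acc
    simp only [List.foldl_cons]
    rw [step_eq hv i j lo hi acc hh, ih]

theorem core_neg {hv : Int} (hh : hv < 0) (i : Int) :
    ∀ (E : List Int) (acc : Int), 0 ≤ acc →
      E.foldl (fun acc j => max acc (|i - j| * hv)) acc = acc := by
  intro E
  induction E with
  | nil => intro acc _; rfl
  | cons j E ih =>
    intro acc hacc
    simp only [List.foldl_cons]
    have h1 : |i - j| * hv ≤ 0 := mul_nonpos_of_nonneg_of_nonpos (abs_nonneg _) hh.le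
    have : max acc (|i - j| * hv) = acc := by omega
    rw [this, ih acc hacc]

-- A's inner loop: vmax-component is the scalar max-fold, and v stays ≤ vmax
theorem tankStep_foldl (l : List Int) (i : Int) :
    ∀ (js : List Int) (vmax v : Int), v ≤ vmax →
      (js.foldl (tankStep l i) (vmax, v)).1 = js.foldl (scalarA l i) vmax
      ∧ (js.foldl (tankStep l i) (vmax, v)).2 ≤ (js.foldl (tankStep l i) (vmax, v)).1 := by
  intro js
  induction js with
  | nil => intro vmax v hv; exact ⟨rfl, hv⟩
  | cons j js ih =>
    intro vmax v hv
    simp only [List.foldl_cons, tankStep, scalarA]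
    by_cases hc : PySem.List.pyGetD l i 0 ≥ PySem.List.pyGetD l j 0
    · rw [if_pos hc, if_pos hc]
      have e : (if |i - j| * PySem.List.pyGetD l i 0 > vmax
                then |i - j| * PySem.List.pyGetD l i 0 else vmax)
          = max vmax (|i - j| * PySem.List.pyGetD l i 0) := by split_ifs <;> omega
      rw [e]
      exact ih _ _ (le_max_right _ _)
    · rw [if_neg hc, if_neg hc, if_neg (by omega : ¬ v > vmax)]
      exact ih _ _ hv

-- A's outer loop in scalar form
theorem tank_outer (l : List Int) :
    ∀ (is : List Int) (vmax v : Int), v ≤ vmax →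
      (is.foldl (fun st i =>
          (PySem.List.pyRange 0 (l.length : Int) 1).foldl (tankStep l i) st) (vmax, v)).1
        = is.foldl (fun acc i =>
            (PySem.List.pyRange 0 (l.length : Int) 1).foldl (scalarA l i) acc) vmax := by
  intro is
  induction is with
  | nil => intro vmax v hv; rfl
  | cons i is ih =>
    intro vmax v hv
    simp only [List.foldl_cons]
    obtain ⟨h1, h2⟩ := tankStep_foldl l i (PySem.List.pyRange 0 (l.length : Int) 1) vmax v hv
    have := ih ((PySem.List.pyRange 0 (l.length : Int) 1).foldl (tankStep l i) (vmax, v)).1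
      ((PySem.List.pyRange 0 (l.length : Int) 1).foldl (tankStep l i) (vmax, v)).2 h2
    rw [← h1]
    exact this

-- per element: A's inner scalar fold equals one candidate Fc (for a nonnegative accumulator)
theorem per_i (l : List Int) (i acc : Int) (hacc : 0 ≤ acc) :
    (PySem.List.pyRange 0 (l.length : Int) 1).foldl (scalarA l i) acc = max acc (Fc l i) := by
  set hv := PySem.List.pyGetD l i 0 with hhv
  set js := PySem.List.pyRange 0 (l.length : Int) 1 with hjs
  have hA : js.foldl (scalarA l i) acc
      = (js.filter (fun j => decide (PySem.List.pyGetD l j 0 ≤ hv))).foldl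
          (fun acc j => max acc (|i - j| * hv)) acc := by
    rw [show scalarA l i = (fun (a j : Int) =>
        if PySem.List.pyGetD l j 0 ≤ hv then max a (|i - j| * hv) else a) from rfl]
    exact foldl_ite_filter (fun j => PySem.List.pyGetD l j 0 ≤ hv) _ js acc
  have hE : Eset l i = js.filter (fun j => decide (PySem.List.pyGetD l j 0 ≤ hv)) := rfl
  rw [hA, Fc, mlo, mhi, hE]
  set E := js.filter (fun j => decide (PySem.List.pyGetD l j 0 ≤ hv)) with hEd
  by_cases hsign : 0 ≤ hv
  · have start : acc = max acc (hv * max (i - i) (i - i)) := by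
      simp
      omega
    calc E.foldl (fun acc j => max acc (|i - j| * hv)) acc
        = E.foldl (fun acc j => max acc (|i - j| * hv)) (max acc (hv * max (i - i) (i - i))) := by
          rw [← start]
      _ = _ := core_nonneg hsign i E i i acc
  · have hneg : hv < 0 := by omega
    rw [core_neg hneg i E acc hacc]
    have hlo : E.foldl (fun a j => if j < a then j else a) i ≤ i := foldl_min_le E i
    have hhi : i ≤ E.foldl (fun a j => if j > a then j else a) i := le_foldl_max' E i
    have hcand : hv * max (i - E.foldl (fun a j => if j < a then j else a) i)
        (E.foldl (fun a j => if j > a then j else a) i - i) ≤ 0 :=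
      mul_nonpos_of_nonpos_of_nonneg hneg.le (by omega)
    simp only [← hhv]
    omega

-- A's outer loop as a max-fold of the candidates Fc
theorem outer_to_F (l : List Int) :
    ∀ (is : List Int) (acc : Int), 0 ≤ acc →
      is.foldl (fun acc i =>
          (PySem.List.pyRange 0 (l.length : Int) 1).foldl (scalarA l i) acc) acc
        = is.foldl (fun b i => max b (Fc l i)) acc := by
  intro is
  induction is with
  | nil => intro acc _; rfl
  | cons i is ih =>
    intro acc hacc
    simp only [List.foldl_cons]
    rw [per_i l i acc hacc]
    exact ih _ (le_trans hacc (le_max_left _ _))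

theorem tankA_eq (l : List Int) :
    tank l = (PySem.List.pyRange 0 (l.length : Int) 1).foldl (fun b i => max b (Fc l i)) 0 := by
  unfold tank
  rw [tank_outer l _ 0 0 le_rfl]
  exact outer_to_F l _ 0 le_rfl

-- ----- B side -----

theorem lostep_eq_min : (fun (a k : Int) => if k < a then k else a) = (fun a k => min a k) := by
  funext a k
  rw [min_def]
  split_ifs <;> omega

theorem histep_eq_max : (fun (a k : Int) => if k > a then k else a) = (fun a k => max a k) := by
  funext a k
  rw [max_def]
  split_ifs <;> omega

-- a min-fold does not care where it starts, as long as the start dominates a member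
theorem foldl_min_start {S : List Int} {k n : Int} (hk : k ∈ S) (hkn : k ≤ n) :
    S.foldl (fun a b => min a b) n = S.foldl (fun a b => min a b) k := by
  haveI : RightCommutative (fun (a b : Int) => min a b) := ⟨fun a b c => by omega⟩
  have hperm := List.perm_cons_erase hk
  rw [hperm.foldl_eq n, hperm.foldl_eq k]
  simp only [List.foldl_cons]
  have h1 : min n k = k := by omega
  have h2 : min k k = k := by omega
  rw [h1, h2]

theorem foldl_max_start {S : List Int} {k m : Int} (hk : k ∈ S) (hmk : m ≤ k) :
    S.foldl (fun a b => max a b) m = S.foldl (fun a b => max a b) k := by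
  haveI : RightCommutative (fun (a b : Int) => max a b) := ⟨fun a b c => by omega⟩
  have hperm := List.perm_cons_erase hk
  rw [hperm.foldl_eq m, hperm.foldl_eq k]
  simp only [List.foldl_cons]
  have h1 : max m k = k := by omega
  have h2 : max k k = k := by omega
  rw [h1, h2]

-- the invariant of B's grouped sweep: P is the processed prefix (all strictly smaller values),
-- lo/hi/best are the folds over P, and the loop completes the max-fold of Fc over P ++ rest
theorem loop_spec (l : List Int) :
    ∀ (n : Nat) (rest P : List Int), rest.length ≤ n →
      (P ++ rest).Perm (PySem.List.pyRange 0 (l.length : Int) 1) →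
      (P ++ rest).Pairwise (fun a b => PySem.List.pyGetD l a 0 ≤ PySem.List.pyGetD l b 0) →
      (∀ p ∈ P, ∀ r ∈ rest, PySem.List.pyGetD l p 0 < PySem.List.pyGetD l r 0) →
      tankAltLoop l rest
          (P.foldl (fun a k => if k < a then k else a) (l.length : Int))
          (P.foldl (fun a k => if k > a then k else a) (-1))
          (P.foldl (fun b k => max b (Fc l k)) 0)
        = (P ++ rest).foldl (fun b k => max b (Fc l k)) 0 := by
  intro n
  induction n with
  | zero =>
    intro rest P hlen hperm hpair hbound
    have : rest = [] := List.eq_nil_of_length_eq_zero (Nat.le_zero.mp hlen)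
    subst this
    simp [tankAltLoop]
  | succ n ih =>
    intro rest P hlen hperm hpair hbound
    match rest with
    | [] => simp [tankAltLoop]
    | k0 :: r =>
      rw [tankAltLoop]
      set v := PySem.List.pyGetD l k0 0 with hv
      set p := (fun k => PySem.List.pyGetD l k 0 == v) with hp
      set G := k0 :: r.takeWhile p with hG
      -- the list is merely re-bracketed
      have hsplit : (P ++ G) ++ r.dropWhile p = P ++ (k0 :: r) := by
        rw [List.append_assoc]
        simp only [hG, List.cons_append]
        rw [List.takeWhile_append_dropWhile]
      -- every member of the group has value v
      have hGv : ∀ k ∈ G, PySem.List.pyGetD l k 0 = v := by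
        intro k hk
        rcases List.mem_cons.mp hk with h | h
        · rw [h]
        · have := List.mem_takeWhile_imp h
          simpa [hp] using this
      -- every member of P has value < v
      have hPlt : ∀ q ∈ P, PySem.List.pyGetD l q 0 < v := by
        intro q hq
        exact hbound q hq k0 (List.mem_cons_self ..)
      have hpair_rest : (k0 :: r).Pairwise
          (fun a b => PySem.List.pyGetD l a 0 ≤ PySem.List.pyGetD l b 0) :=
        (List.pairwise_append.mp hpair).2.1
      -- every member of the dropped suffix has value > v
      have hR2gt : ∀ x ∈ r.dropWhile p, v < PySem.List.pyGetD l x 0 := by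
        cases hdw : r.dropWhile p with
        | nil => intro x hx; simp at hx
        | cons h0 t =>
          have hh0' := List.head_dropWhile_not p (l := r) (by rw [hdw]; simp)
          simp only [hdw, List.head_cons] at hh0'
          have hh0ne : PySem.List.pyGetD l h0 0 ≠ v := by simpa [hp] using hh0'
          have hh0r : h0 ∈ r := (List.dropWhile_sublist p).mem (by rw [hdw]; simp)
          have hh0gt : v < PySem.List.pyGetD l h0 0 :=
            lt_of_le_of_ne ((List.pairwise_cons.mp hpair_rest).1 h0 hh0r) (Ne.symm hh0ne)
          have hpairR2 : (h0 :: t).Pairwise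
              (fun a b => PySem.List.pyGetD l a 0 ≤ PySem.List.pyGetD l b 0) := by
            rw [← hdw]
            exact List.Pairwise.sublist (List.dropWhile_sublist p)
              ((List.pairwise_cons.mp hpair_rest).2)
          intro x hx
          rcases List.mem_cons.mp hx with h | h
          · rw [h]; exact hh0gt
          · exact lt_of_lt_of_le hh0gt ((List.pairwise_cons.mp hpairR2).1 x h)
      -- members of P ++ G are genuine indices
      have hPGmem : ∀ x ∈ P ++ G, (0:Int) ≤ x ∧ x < (l.length : Int) := by
        intro x hx
        have hxr : x ∈ PySem.List.pyRange 0 (l.length : Int) 1 := by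
          rw [← hperm.mem_iff, ← hsplit]
          exact List.mem_append_left _ hx
        exact PySem.List.mem_pyRange_one.mp hxr
      -- for k in the group, the eligible set is exactly P ++ G (as a multiset)
      have hEperm : ∀ k ∈ G, (Eset l k).Perm (P ++ G) := by
        intro k hk
        have h1 : Eset l k = (PySem.List.pyRange 0 (l.length : Int) 1).filter
            (fun j => decide (PySem.List.pyGetD l j 0 ≤ v)) := by
          rw [Eset, hGv k hk]
        have h2 : ((P ++ G) ++ r.dropWhile p).filter
            (fun j => decide (PySem.List.pyGetD l j 0 ≤ v)) = P ++ G := by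
          rw [List.filter_append]
          have hl : (P ++ G).filter (fun j => decide (PySem.List.pyGetD l j 0 ≤ v)) = P ++ G := by
            rw [List.filter_eq_self]
            intro a ha
            rcases List.mem_append.mp ha with h | h
            · simpa using le_of_lt (hPlt a h)
            · simpa using le_of_eq (hGv a h)
          have hr : (r.dropWhile p).filter (fun j => decide (PySem.List.pyGetD l j 0 ≤ v)) = [] := by
            rw [List.filter_eq_nil_iff]
            intro a ha
            simpa using not_le.mpr (hR2gt a ha)
          rw [hl, hr, List.append_nil]
        rw [h1, ← h2]
        refine List.Perm.filter _ ?_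
        rw [hsplit]
        exact hperm.symm
      -- lo'/hi' are the folds over P ++ G, and they equal mlo/mhi at every group member
      have hlo' : ∀ k ∈ G, mlo l k
          = G.foldl (fun a b => if b < a then b else a)
              (P.foldl (fun a b => if b < a then b else a) (l.length : Int)) := by
        intro k hk
        haveI : RightCommutative (fun (a b : Int) => min a b) := ⟨fun a b c => by omega⟩
        rw [mlo, lostep_eq_min, ← List.foldl_append]
        rw [(hEperm k hk).foldl_eq k]
        have hkPG : k ∈ P ++ G := List.mem_append_right _ hk
        have hkn : k ≤ (l.length : Int) := le_of_lt (hPGmem k hkPG).2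
        exact (foldl_min_start hkPG hkn).symm
      have hhi' : ∀ k ∈ G, mhi l k
          = G.foldl (fun a b => if b > a then b else a)
              (P.foldl (fun a b => if b > a then b else a) (-1)) := by
        intro k hk
        haveI : RightCommutative (fun (a b : Int) => max a b) := ⟨fun a b c => by omega⟩
        rw [mhi, histep_eq_max, ← List.foldl_append]
        rw [(hEperm k hk).foldl_eq k]
        have hkPG : k ∈ P ++ G := List.mem_append_right _ hk
        have hkm : (-1 : Int) ≤ k := by have := (hPGmem k hkPG).1; omega
        exact (foldl_max_start hkPG hkm).symm
      -- the score computed for each group member is exactly Fc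
      have hbest : G.foldl (fun b k =>
            if v * max (k - G.foldl (fun a b => if b < a then b else a)
                  (P.foldl (fun a b => if b < a then b else a) (l.length : Int)))
                (G.foldl (fun a b => if b > a then b else a)
                  (P.foldl (fun a b => if b > a then b else a) (-1)) - k) > b
            then v * max (k - G.foldl (fun a b => if b < a then b else a)
                  (P.foldl (fun a b => if b < a then b else a) (l.length : Int)))
                (G.foldl (fun a b => if b > a then b else a)
                  (P.foldl (fun a b => if b > a then b else a) (-1)) - k)
            else b)
            (P.foldl (fun b k => max b (Fc l k)) 0)
          = (P ++ G).foldl (fun b k => max b (Fc l k)) 0 := by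
        rw [List.foldl_append]
        refine PySem.List.foldl_congr_mem G _ _ _ ?_
        intro acc k hk
        have hfc : Fc l k = v * max (k - G.foldl (fun a b => if b < a then b else a)
                  (P.foldl (fun a b => if b < a then b else a) (l.length : Int)))
                (G.foldl (fun a b => if b > a then b else a)
                  (P.foldl (fun a b => if b > a then b else a) (-1)) - k) := by
          rw [Fc, hGv k hk, ← hlo' k hk, ← hhi' k hk]
        rw [← hfc]
        split_ifs <;> omega
      -- apply the induction hypothesis to P ++ G and the dropped suffix
      have hlen2 : (r.dropWhile p).length ≤ n := by
        have h1 : (r.dropWhile p).length ≤ r.length := List.length_dropWhile_le _ _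
        have h2 : r.length + 1 ≤ n + 1 := by simpa using hlen
        omega
      have hperm2 : ((P ++ G) ++ r.dropWhile p).Perm (PySem.List.pyRange 0 (l.length : Int) 1) := by
        rw [hsplit]; exact hperm
      have hpair2 : ((P ++ G) ++ r.dropWhile p).Pairwise
          (fun a b => PySem.List.pyGetD l a 0 ≤ PySem.List.pyGetD l b 0) := by
        rw [hsplit]; exact hpair
      have hbound2 : ∀ q ∈ P ++ G, ∀ x ∈ r.dropWhile p,
          PySem.List.pyGetD l q 0 < PySem.List.pyGetD l x 0 := by
        intro q hq x hx
        rcases List.mem_append.mp hq with h | h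
        · exact lt_trans (hPlt q h) (hR2gt x hx)
        · rw [hGv q h]; exact hR2gt x hx
      have hIH := ih (r.dropWhile p) (P ++ G) hlen2 hperm2 hpair2 hbound2
      rw [hsplit] at hIH
      rw [hbest]
      rw [← List.foldl_append (l := P) (l' := G) (f := fun a k => if k < a then k else a)]
      rw [← List.foldl_append (l := P) (l' := G) (f := fun a k => if k > a then k else a)]
      exact hIH

theorem tankB_eq (l : List Int) :
    tank_alt l = (PySem.List.pyRange 0 (l.length : Int) 1).foldl (fun b i => max b (Fc l i)) 0 := by
  unfold tank_alt
  set order := PySem.List.sorted (PySem.List.pyRange 0 (l.length : Int) 1)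
    (fun k => PySem.List.pyGetD l k 0) with horder
  have hperm : order.Perm (PySem.List.pyRange 0 (l.length : Int) 1) :=
    PySem.List.sorted_perm _ _ _
  have hpair : order.Pairwise (fun a b => PySem.List.pyGetD l a 0 ≤ PySem.List.pyGetD l b 0) := by
    simpa using PySem.List.sorted_pairwise (PySem.List.pyRange 0 (l.length : Int) 1)
      (fun k => PySem.List.pyGetD l k 0)
  have hbound : ∀ q ∈ ([] : List Int), ∀ x ∈ order,
      PySem.List.pyGetD l q 0 < PySem.List.pyGetD l x 0 := by
    intro q hq
    simp at hq
  have h := loop_spec l order.length order [] le_rfl (by simpa using hperm)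
    (by simpa using hpair) hbound
  simp only [List.foldl_nil, List.nil_append] at h
  rw [h]
  haveI : RightCommutative (fun (b k : Int) => max b (Fc l k)) := ⟨fun a b c => by omega⟩
  exact hperm.foldl_eq 0

-- ===== VERDICT (by name: the statement is the Claim_ definition above) =====
theorem tank_spec : Claim_equal_tank := by
  intro l _
  show tank l = tank_alt l
  rw [tankA_eq, tankB_eq]
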